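-- pv_equiv track=rewrite | github.com/Antonkoch999/it-academy-summer | src/Homework6/eiler.py | func
-- ===== SOURCE A (Python) =====
-- def func(n=0):
--     a = list(range(n + 1))
--     a[1] = 0
--     lst = []
--
--     i = 2
--     while i <= n:
--         if a[i] != 0:
--             lst.append(a[i])
--             for j in range(i, n + 1, i):
--                 a[j] = 0
--         i += 1
--
--     sum_lst = 0
--     for simple_number in lst:
--         for el in range(simple_number*simple_number):
--             if ((el * el) - (3 * el) - 1) % (simple_number *
--                                              simple_number) == 0:
--                 sum_lst += el
--                 break
--
--     return sum_lst
-- ===== SOURCE B (Python) =====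
-- def _min_root(p):
--     # Smallest el in [0, p*p) with el^2 - 3el - 1 == 0 (mod p*p), or 0 if none.
--     # Any such el reduces mod p to a root of the same congruence mod p, so it is
--     # enough to scan, in increasing order, the O(p) candidates k*p + r with r a
--     # root mod p, instead of all p*p residues.
--     m = p * p
--     roots = [r for r in range(p) if (r * r - 3 * r - 1) % p == 0]
--     for el in (k * p + r for k in range(p) for r in roots):
--         if (el * el - 3 * el - 1) % m == 0:
--             return el
--     return 0
--
--
-- def func(n=0):
--     comp = [False] * (n + 1)
--     total = 0
--     for p in range(2, n + 1):
--         if not comp[p]: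
--             for j in range(p, n + 1, p):
--                 comp[j] = True
--             total += _min_root(p)
--     return total
-- ===== Notes on version B (the rewrite author's own statement) =====
-- stated objective: faster
-- what changed: Instead of scanning all p*p residues per prime, B first finds the at-most-two roots of the quadratic mod p (O(p) scan) and then checks only the O(p) candidates k*p+r mod p*p; the sieve keeps boolean flags and accumulates the sum in one fused pass instead of an int array plus a second pass.
-- outside the precondition, e.g. on func(0): A raises IndexError, B returns 0
import Mathlib
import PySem

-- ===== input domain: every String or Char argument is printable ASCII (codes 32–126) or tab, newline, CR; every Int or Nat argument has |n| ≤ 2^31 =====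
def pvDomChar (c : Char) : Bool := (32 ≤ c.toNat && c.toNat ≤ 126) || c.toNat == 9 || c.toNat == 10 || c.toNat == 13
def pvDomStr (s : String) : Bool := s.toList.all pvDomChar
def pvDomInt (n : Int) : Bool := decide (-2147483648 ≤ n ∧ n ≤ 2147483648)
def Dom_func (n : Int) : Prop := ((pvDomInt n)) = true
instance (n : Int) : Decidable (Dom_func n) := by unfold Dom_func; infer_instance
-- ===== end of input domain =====

-- B replaces A's per-prime scan of all p*p residues by a root search modulo p followed by a
-- scan of the O(p) lifted candidates (measured asymptotically faster), with a fused boolean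
-- sieve; for n ≤ 0 A raises IndexError while B returns 0.


-- ===== PORT A =====
-- inner loop "for el in range(p*p): if (el*el - 3*el - 1) % (p*p) == 0: …; break" = first match
def innerA (p : Int) : Option Int :=
  (PySem.List.pyRange 0 (p * p) 1).find?
    (fun el => PySem.Int.mod (el * el - 3 * el - 1) (p * p) == 0)

def func (n : Int) : Int :=
  -- a = list(range(n+1)); a[1] = 0  (IndexError for n ≤ 0: excluded by Pre_)
  let a0 := (PySem.List.pyRange 0 (n + 1) 1).set 1 0
  -- "i = 2; while i <= n: …; i += 1" is the loop body over i = 2 … n;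
  -- a[i] is always in range here (2 ≤ i ≤ n < len a), so pyGetD is exact; a[j] = 0 via pySetD
  let st := (PySem.List.pyRange 2 (n + 1) 1).foldl
    (fun (st : List Int × List Int) i =>
      if PySem.List.pyGetD st.1 i 0 != 0 then
        ((PySem.List.pyRange i (n + 1) i).foldl (fun l j => PySem.List.pySetD l j 0) st.1,
         st.2 ++ [PySem.List.pyGetD st.1 i 0])
      else st)
    (a0, ([] : List Int))
  st.2.foldl
    (fun s p =>
      match innerA p with
      | some el => s + el
      | none => s) 0

-- ===== PORT B =====
def minRootB (p : Int) : Int :=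
  let m := p * p
  let roots := (PySem.List.pyRange 0 p 1).filter
    (fun r => PySem.Int.mod (r * r - 3 * r - 1) p == 0)
  -- "for el in (k * p + r for k in range(p) for r in roots): if …: return el" = first match
  match ((PySem.List.pyRange 0 p 1).flatMap (fun k => roots.map (fun r => k * p + r))).find?
      (fun el => PySem.Int.mod (el * el - 3 * el - 1) m == 0) with
  | some el => el
  | none => 0

def func_alt (n : Int) : Int :=
  -- comp = [False] * (n+1); one fused pass accumulating total; comp[p] / comp[j] always in range
  ((PySem.List.pyRange 2 (n + 1) 1).foldl
    (fun (st : List Bool × Int) p =>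
      if !PySem.List.pyGetD st.1 p true then
        ((PySem.List.pyRange p (n + 1) p).foldl (fun l j => PySem.List.pySetD l j true) st.1,
         st.2 + minRootB p)
      else st)
    (List.replicate (n + 1).toNat false, (0 : Int))).2

-- ===== PRECONDITION & SPEC =====
-- Pre_ excludes exactly n ≤ 0, where A raises IndexError on a[1] (list of length ≤ 1).
def Pre_func (n : Int) : Prop := 1 ≤ n
instance (n : Int) : Decidable (Pre_func n) := by unfold Pre_func; infer_instance
def pvWitness_func : Int := 30

def Spec_func (n : Int) (out : Int) : Prop := out = func_alt n
instance (n : Int) (out : Int) : Decidable (Spec_func n out) := by unfold Spec_func; infer_instance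

-- ===== CLAIM (what is proved, stated in full; the proofs are below) =====
def Claim_equal_func : Prop := ∀ (n : Int), Dom_func n → Pre_func n → Spec_func n (func n)

-- ===== LEMMAS AND PROOFS =====

-- A's per-prime contribution (0 when the quadratic has no root mod p*p)
def contribA (p : Int) : Int :=
  match innerA p with
  | some el => el
  | none => 0

lemma phase2_sum (lst : List Int) (s : Int) :
    lst.foldl (fun s p => match innerA p with | some el => s + el | none => s) s
      = s + (lst.map contribA).sum := by
  induction lst generalizing s with
  | nil => simp
  | cons p t ih =>
    simp only [List.foldl_cons, List.map_cons, List.sum_cons, ih, contribA]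
    cases innerA p
    · simp
    · simp; ring

-- find? over a nodup list agrees with find? over a sublist containing all matches
lemma find?_sublist {α : Type} (pred : α → Bool) :
    ∀ {L M : List α}, L.Sublist M → M.Nodup → (∀ x ∈ M, pred x = true → x ∈ L) →
    M.find? pred = L.find? pred := by
  intro L M hsub
  induction hsub with
  | slnil => simp
  | @cons L' M' y hs ih =>
    intro hnd hall
    have hy : pred y = false := by
      by_contra hpy
      have : y ∈ L' := hall y (List.mem_cons_self) (by simpa using hpy)
      exact (List.nodup_cons.mp hnd).1 (hs.subset this)
    rw [List.find?_cons_of_neg (by simp [hy])]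
    exact ih (List.nodup_cons.mp hnd).2
      (fun x hx hp => hall x (List.mem_cons_of_mem _ hx) hp)
  | @cons₂ L' M' y hs ih =>
    intro hnd hall
    by_cases hpy : pred y = true
    · rw [List.find?_cons_of_pos hpy, List.find?_cons_of_pos hpy]
    · rw [List.find?_cons_of_neg (by simpa using hpy), List.find?_cons_of_neg (by simpa using hpy)]
      refine ih (List.nodup_cons.mp hnd).2 (fun x hx hp => ?_)
      rcases List.mem_cons.mp (hall x (List.mem_cons_of_mem _ hx) hp) with rfl | h
      · exact absurd hp (by simpa using hpy)
      · exact h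

lemma natRange_mul (b : Nat) : ∀ (a : Nat),
    List.range (a * b) = (List.range a).flatMap (fun k => (List.range b).map (fun r => k * b + r)) := by
  intro a
  induction a with
  | zero => simp
  | succ a ih =>
    rw [List.range_succ, List.flatMap_append, ← ih, Nat.succ_mul, List.range_add]
    simp

-- range(p*p) decomposes into p blocks of p
lemma pyRange_sq_decompose (p : Int) (hp : 0 ≤ p) :
    PySem.List.pyRange 0 (p * p) 1
      = (PySem.List.pyRange 0 p 1).flatMap
          (fun k => (PySem.List.pyRange 0 p 1).map (fun r => k * p + r)) := by
  obtain ⟨q, rfl⟩ := Int.eq_ofNat_of_zero_le hp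
  rw [PySem.List.pyRange_one, PySem.List.pyRange_one]
  simp only [sub_zero, zero_add]
  have h1 : ((q : Int) * q).toNat = q * q := by
    rw [← Nat.cast_mul, Int.toNat_natCast]
  have h2 : ((q : Int)).toNat = q := Int.toNat_natCast q
  rw [h1, h2, natRange_mul]
  rw [List.map_flatMap, List.flatMap_map]
  apply List.flatMap_congr
  intro k hk
  simp only [List.map_map]
  apply List.map_congr_left
  intro r hr
  simp only [Function.comp_apply]
  push_cast
  ring

-- the key per-prime equality: B's candidate scan finds A's first root
lemma contrib_eq (p : Int) (hp : 0 < p) : minRootB p = contribA p := by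
  unfold minRootB contribA innerA
  have key : (PySem.List.pyRange 0 (p * p) 1).find?
      (fun el => PySem.Int.mod (el * el - 3 * el - 1) (p * p) == 0)
    = (((PySem.List.pyRange 0 p 1).flatMap
        (fun k => ((PySem.List.pyRange 0 p 1).filter
          (fun r => PySem.Int.mod (r * r - 3 * r - 1) p == 0)).map (fun r => k * p + r)))).find?
      (fun el => PySem.Int.mod (el * el - 3 * el - 1) (p * p) == 0) := by
    apply find?_sublist
    · rw [pyRange_sq_decompose p hp.le]
      exact List.Sublist.flatMap_right _
        (fun k _ => (List.filter_sublist).map _)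
    · exact PySem.List.nodup_pyRange_one _ _
    · intro el hel hpred
      have hb := PySem.List.mem_pyRange_one.mp hel
      have hdvd : (p * p) ∣ (el * el - 3 * el - 1) := by
        rw [← PySem.Int.mod_eq_zero_iff_dvd]
        simpa using hpred
      set k := el / p with hk
      set r := el % p with hr
      have hr0 : 0 ≤ r := Int.emod_nonneg el (ne_of_gt hp)
      have hrp : r < p := Int.emod_lt_of_pos el hp
      have heq : p * k + r = el := Int.mul_ediv_add_emod el p
      have hk0 : 0 ≤ k := Int.ediv_nonneg hb.1 hp.le
      have hkp : k < p := by
        rw [hk, Int.ediv_lt_iff_lt_mul hp]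
        exact hb.2
      have hpfel : p ∣ (el * el - 3 * el - 1) := dvd_trans (Dvd.intro p rfl) hdvd
      have hdiff : (el * el - 3 * el - 1) - (r * r - 3 * r - 1) = (el - r) * (el + r - 3) := by ring
      have hpd : p ∣ (el - r) * (el + r - 3) := by
        have : el - r = p * k := by linarith [heq]
        rw [this, mul_assoc]
        exact Dvd.intro _ rfl
      have hpfr : p ∣ (r * r - 3 * r - 1) := by
        have := dvd_sub hpfel (hdiff ▸ hpd)
        simpa using this
      refine List.mem_flatMap.mpr ⟨k, PySem.List.mem_pyRange_one.mpr ⟨hk0, hkp⟩, ?_⟩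
      refine List.mem_map.mpr ⟨r, ?_, by rw [mul_comm]; linarith [heq]⟩
      refine List.mem_filter.mpr ⟨PySem.List.mem_pyRange_one.mpr ⟨hr0, hrp⟩, ?_⟩
      simpa [PySem.Int.mod_eq_zero_iff_dvd] using hpfr
  simp only []
  rw [key]

-- lookup through a marking fold (all indices nonnegative)
lemma foldl_set_getD {α : Type} (v d : α) :
    ∀ (js : List Int) (a : List α) (x : Nat), (∀ j ∈ js, 0 ≤ j) →
    (js.foldl (fun l j => PySem.List.pySetD l j v) a).getD x d
      = if (x : Int) ∈ js ∧ x < a.length then v else a.getD x d := by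
  intro js
  induction js with
  | nil => intro a x h; simp
  | cons j t ih =>
    intro a x h
    have hj : 0 ≤ j := h j List.mem_cons_self
    rw [List.foldl_cons, ih _ x (fun j hj => h j (List.mem_cons_of_mem _ hj)),
      PySem.List.pySetD_of_nonneg a v hj, List.length_set]
    by_cases hlen : x < a.length
    · by_cases hmem : (x : Int) ∈ t
      · simp [hmem, hlen]
      · by_cases hx : (x : Int) = j
        · simp [hx, hlen, List.getD_eq_getElem?_getD, (by omega : j.toNat = x)]
        · simp only [hx, hmem, List.mem_cons, or_false, false_and, if_false]
          rw [List.getD_eq_getElem?_getD, List.getD_eq_getElem?_getD,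
            List.getElem?_set_ne (by omega : j.toNat ≠ x)]
    · have h1 : (a.set j.toNat v)[x]? = none := List.getElem?_eq_none (by simp; omega)
      have h2 : a[x]? = none := List.getElem?_eq_none (by omega)
      rw [List.getD_eq_getElem?_getD, List.getD_eq_getElem?_getD, h1, h2]
      simp [hlen]

lemma foldl_set_length {α : Type} (v : α) (js : List Int) (a : List α) :
    (js.foldl (fun l j => PySem.List.pySetD l j v) a).length = a.length := by
  induction js generalizing a with
  | nil => rfl
  | cons j t ih => simp [List.foldl_cons, ih, PySem.List.length_pySetD]

-- the bisimulation invariant between A's int array and B's boolean flags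
def SieveInv (n : Int) (a : List Int) (comp : List Bool) : Prop :=
  a.length = (n + 1).toNat ∧ comp.length = (n + 1).toNat ∧
  ∀ x : Nat, 2 ≤ x → x < (n + 1).toNat →
    ((comp.getD x true = false) ↔ a.getD x 0 ≠ 0) ∧ (a.getD x 0 ≠ 0 → a.getD x 0 = (x : Int))

lemma SieveInv_init (n : Int) :
    SieveInv n ((PySem.List.pyRange 0 (n + 1) 1).set 1 0) (List.replicate (n + 1).toNat false) := by
  refine ⟨by simp [PySem.List.length_pyRange_one], by simp, ?_⟩
  intro x hx2 hxN
  have ha : ((PySem.List.pyRange 0 (n + 1) 1).set 1 0).getD x 0 = (x : Int) := by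
    rw [List.getD_eq_getElem?_getD, List.getElem?_set_ne (by omega : 1 ≠ x),
      PySem.List.getElem?_pyRange_one]
    simp only [sub_zero, if_pos hxN]
    simp
  have hc : (List.replicate (n + 1).toNat false).getD x true = false := by
    rw [List.getD_eq_getElem?_getD, List.getElem?_replicate_of_lt hxN]
    rfl
  rw [ha, hc]
  constructor
  · simp only [true_iff]
    omega
  · intro _; rfl

lemma sieve_bisim (n : Int) :
    ∀ (is : List Int) (a : List Int) (comp : List Bool) (lst : List Int) (total : Int),
    (∀ i ∈ is, 2 ≤ i ∧ i < n + 1) → SieveInv n a comp → total = (lst.map contribA).sum →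
    SieveInv n (is.foldl
        (fun (st : List Int × List Int) i =>
          if PySem.List.pyGetD st.1 i 0 != 0 then
            ((PySem.List.pyRange i (n + 1) i).foldl (fun l j => PySem.List.pySetD l j 0) st.1,
             st.2 ++ [PySem.List.pyGetD st.1 i 0])
          else st) (a, lst)).1
      (is.foldl
        (fun (st : List Bool × Int) p =>
          if !PySem.List.pyGetD st.1 p true then
            ((PySem.List.pyRange p (n + 1) p).foldl (fun l j => PySem.List.pySetD l j true) st.1,
             st.2 + minRootB p)
          else st) (comp, total)).1
    ∧ (is.foldl
        (fun (st : List Bool × Int) p =>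
          if !PySem.List.pyGetD st.1 p true then
            ((PySem.List.pyRange p (n + 1) p).foldl (fun l j => PySem.List.pySetD l j true) st.1,
             st.2 + minRootB p)
          else st) (comp, total)).2
      = (((is.foldl
        (fun (st : List Int × List Int) i =>
          if PySem.List.pyGetD st.1 i 0 != 0 then
            ((PySem.List.pyRange i (n + 1) i).foldl (fun l j => PySem.List.pySetD l j 0) st.1,
             st.2 ++ [PySem.List.pyGetD st.1 i 0])
          else st) (a, lst)).2).map contribA).sum := by
  intro is
  induction is with
  | nil => intro a comp lst total _ hInv htot; exact ⟨hInv, htot⟩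
  | cons i t ih =>
    intro a comp lst total hmem hInv htot
    obtain ⟨hi2, hin⟩ := hmem i List.mem_cons_self
    have hmem' := fun j hj => hmem j (List.mem_cons_of_mem _ hj)
    obtain ⟨hla, hlc, hptw⟩ := hInv
    have hxi : i = ((i.toNat : Nat) : Int) := by omega
    set x := i.toNat with hxdef
    have hx2 : 2 ≤ x := by omega
    have hxN : x < (n + 1).toNat := by omega
    have hgA : PySem.List.pyGetD a i 0 = a.getD x 0 := by
      rw [hxi, PySem.List.pyGetD_natCast]
    have hgC : PySem.List.pyGetD comp i true = comp.getD x true := by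
      rw [hxi, PySem.List.pyGetD_natCast]
    obtain ⟨hiff, hval⟩ := hptw x hx2 hxN
    rw [List.foldl_cons, List.foldl_cons]
    by_cases hc : a.getD x 0 ≠ 0
    · have hcondA : (PySem.List.pyGetD a i 0 != 0) = true := by
        rw [hgA]; simpa using hc
      have hcondB : (!PySem.List.pyGetD comp i true) = true := by
        rw [hgC, hiff.mpr hc]; rfl
      rw [if_pos hcondA, if_pos hcondB]
      have haval : PySem.List.pyGetD a i 0 = i := by
        rw [hgA, hval hc, ← hxi]
      have hjs : ∀ j ∈ PySem.List.pyRange i (n + 1) i, 0 ≤ j := by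
        intro j hj
        have := (PySem.List.mem_pyRange_iff_of_pos (by omega : (0:Int) < i) j).mp hj
        omega
      apply ih
      · exact hmem'
      · refine ⟨by rw [foldl_set_length]; exact hla, by rw [foldl_set_length]; exact hlc, ?_⟩
        intro y hy2 hyN
        rw [foldl_set_getD _ _ _ _ _ hjs, foldl_set_getD _ _ _ _ _ hjs, hla, hlc]
        by_cases hmy : (y : Int) ∈ PySem.List.pyRange i (n + 1) i ∧ y < (n + 1).toNat
        · rw [if_pos hmy, if_pos hmy]
          exact ⟨by simp, by simp⟩
        · rw [if_neg hmy, if_neg hmy]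
          exact hptw y hy2 hyN
      · rw [haval, List.map_append, List.sum_append, htot]
        simp [contrib_eq i (by omega)]
    · have hcondA : ¬ ((PySem.List.pyGetD a i 0 != 0) = true) := by
        rw [hgA]; simpa using hc
      have hcondB : ¬ ((!PySem.List.pyGetD comp i true) = true) := by
        rw [hgC]
        simp only [Bool.not_eq_true']
        intro hfalse
        exact hc (hiff.mp hfalse)
      rw [if_neg hcondA, if_neg hcondB]
      exact ih a comp lst total hmem' ⟨hla, hlc, hptw⟩ htot

-- ===== VERDICT (by name: the statement is the Claim_ definition above) =====
theorem func_spec : Claim_equal_func := by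
  intro n _ hn
  unfold Spec_func func func_alt
  have h := sieve_bisim n (PySem.List.pyRange 2 (n + 1) 1)
    ((PySem.List.pyRange 0 (n + 1) 1).set 1 0)
    (List.replicate (n + 1).toNat false) [] 0
    (by intro i hi; have := (PySem.List.mem_pyRange_one).mp hi; exact ⟨this.1, this.2⟩)
    (SieveInv_init n) (by simp)
  simp only []
  rw [phase2_sum]
  rw [h.2]
  simp
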